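-- pv_equiv track=rewrite | github.com/hashiDrama/assignment | isTwoSidedPrime.py | isLeftSidedPrime
-- ===== SOURCE A (Python) =====
-- def isLeftSidedPrime(n, isPrimeArr):
--     temp = n
--     count = getDigitCount(n)
--     mod = 0
--     while count > 0:
--         mod = pow(10,count)
--         temp = n % mod
--         if isPrimeArr[temp] == False :
--             return False
--         count = count-1
--     return True
--
-- def getDigitCount(n):
--     digitCount = 1
--     rem = 0
--     temp = n
--     while temp > 0:
--         rem = temp % 10
--         temp = temp // 10
--         digitCount = digitCount + 1
--     return digitCount
-- ===== SOURCE B (Python) =====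
-- def isLeftSidedPrime(n, isPrimeArr):
--     # One pass peeling digits from the least-significant end; no digit count, no pow.
--     temp, suffix, place = n, 0, 1
--     while True:
--         suffix += (temp % 10) * place
--         if isPrimeArr[suffix] == False:
--             return False
--         temp //= 10
--         place *= 10
--         if temp <= 0:
--             return True
-- ===== Notes on version B (the rewrite author's own statement) =====
-- stated objective: simpler
-- what changed: B drops the separate digit-count pass and the per-suffix pow/mod recomputation: a single do-while pass peels digits from the least-significant end, maintaining a running suffix value and a place multiplier, checking each suffix once.
import Mathlib
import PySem

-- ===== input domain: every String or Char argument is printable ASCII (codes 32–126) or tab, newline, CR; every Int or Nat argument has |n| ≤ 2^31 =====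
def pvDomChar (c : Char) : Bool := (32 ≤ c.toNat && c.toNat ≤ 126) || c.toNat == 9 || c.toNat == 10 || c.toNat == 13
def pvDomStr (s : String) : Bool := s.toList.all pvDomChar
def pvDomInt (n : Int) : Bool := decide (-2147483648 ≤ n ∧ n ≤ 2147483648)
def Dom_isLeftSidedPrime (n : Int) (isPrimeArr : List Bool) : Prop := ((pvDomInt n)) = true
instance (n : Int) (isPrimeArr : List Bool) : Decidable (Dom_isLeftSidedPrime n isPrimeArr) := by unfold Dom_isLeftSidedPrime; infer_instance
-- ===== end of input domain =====

-- B replaces A's digit-count pass + per-suffix pow/mod by a single pass that peels digits from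
-- the least-significant end, maintaining a running suffix value and place multiplier (objective: simpler).

-- ===== PORT A =====
-- while temp > 0: temp //= 10; digitCount += 1
def pvGetDigitCountLoop (temp : Int) (digitCount : Int) : Int :=
  if temp > 0 then
    pvGetDigitCountLoop (PySem.Int.floordiv temp 10) (digitCount + 1)
  else digitCount
termination_by temp.toNat
decreasing_by
  rw [PySem.Int.floordiv_eq_ediv_of_pos (show (0:Int) < 10 by norm_num)]; omega

def getDigitCount (n : Int) : Int := pvGetDigitCountLoop n 1

-- while count > 0: mod = 10**count; temp = n % mod; if arr[temp] == False: return False; count -= 1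
-- (the lookup is pyGetD with an arbitrary default; under Pre_ every index is in range)
def pvALoop (n : Int) (isPrimeArr : List Bool) (count : Int) : Bool :=
  if count > 0 then
    if PySem.List.pyGetD isPrimeArr (PySem.Int.mod n ((10:Int) ^ count.toNat)) true = false then false
    else pvALoop n isPrimeArr (count - 1)
  else true
termination_by count.toNat
decreasing_by omega

def isLeftSidedPrime (n : Int) (isPrimeArr : List Bool) : Bool :=
  pvALoop n isPrimeArr (getDigitCount n)

-- ===== PORT B =====
-- do-while: suffix += (temp % 10) * place; check arr[suffix]; temp //= 10; place *= 10; stop when temp <= 0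
def pvBLoop (isPrimeArr : List Bool) (temp suffix place : Int) : Bool :=
  let suffix' := suffix + PySem.Int.mod temp 10 * place
  if PySem.List.pyGetD isPrimeArr suffix' true = false then false
  else
    let temp' := PySem.Int.floordiv temp 10
    if h : temp' > 0 then pvBLoop isPrimeArr temp' suffix' (place * 10) else true
termination_by temp.toNat
decreasing_by
  have h' : 0 < temp / 10 := by
    rw [← PySem.Int.floordiv_eq_ediv_of_pos (show (0:Int) < 10 by norm_num)]; exact h
  rw [PySem.Int.floordiv_eq_ediv_of_pos (show (0:Int) < 10 by norm_num)]
  omega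

def isLeftSidedPrime_alt (n : Int) (isPrimeArr : List Bool) : Bool :=
  pvBLoop isPrimeArr n 0 1

-- ===== PRECONDITION & SPEC =====
-- A's first lookup is isPrimeArr[n] for n ≥ 0 (resp. isPrimeArr[n % 10] for n < 0), the largest
-- index it ever uses; Pre_ requires exactly that index to be in range, i.e. excludes exactly the
-- inputs on which A raises IndexError.
def Pre_isLeftSidedPrime (n : Int) (isPrimeArr : List Bool) : Prop :=
  (if 0 ≤ n then n else PySem.Int.mod n 10) < (isPrimeArr.length : Int)
instance (n : Int) (isPrimeArr : List Bool) : Decidable (Pre_isLeftSidedPrime n isPrimeArr) := by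
  unfold Pre_isLeftSidedPrime; infer_instance

def pvWitness_isLeftSidedPrime : Int × List Bool :=
  (13, [false, false, true, true, false, true, false, true, false, false, false, true, false, true])

def Spec_isLeftSidedPrime (n : Int) (isPrimeArr : List Bool) (out : Bool) : Prop := out = isLeftSidedPrime_alt n isPrimeArr
instance (n : Int) (isPrimeArr : List Bool) (out : Bool) : Decidable (Spec_isLeftSidedPrime n isPrimeArr out) := by unfold Spec_isLeftSidedPrime; infer_instance

-- ===== CLAIM (what is proved, stated in full; the proofs are below) =====
def Claim_equal_isLeftSidedPrime : Prop := ∀ (n : Int) (isPrimeArr : List Bool), Dom_isLeftSidedPrime n isPrimeArr → Pre_isLeftSidedPrime n isPrimeArr → Spec_isLeftSidedPrime n isPrimeArr (isLeftSidedPrime n isPrimeArr)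

-- ===== LEMMAS AND PROOFS =====

-- number of decimal digits of t (0 for t ≤ 0), the proof-side mirror of getDigitCount's loop
def pvDigits (t : Int) : Nat :=
  if 0 < t then pvDigits (t / 10) + 1 else 0
termination_by t.toNat
decreasing_by omega

theorem pvGdcLoop_eq (t : Int) : ∀ c : Int, pvGetDigitCountLoop t c = c + pvDigits t := by
  induction t using pvDigits.induct with
  | case1 t ht ih =>
    intro c
    rw [pvGetDigitCountLoop, pvDigits,
      PySem.Int.floordiv_eq_ediv_of_pos (show (0:Int) < 10 by norm_num)]
    simp only [ht, if_pos, ih]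
    push_cast; ring
  | case2 t ht =>
    intro c
    rw [pvGetDigitCountLoop, pvDigits]
    simp [if_neg ht]

theorem pvDigits_lt (t : Int) (h : 0 ≤ t) : t < 10 ^ pvDigits t := by
  induction t using pvDigits.induct with
  | case1 t ht ih =>
    rw [pvDigits]; simp only [ht, if_pos]
    have h1 : t / 10 < 10 ^ pvDigits (t / 10) := ih (by omega)
    have h2 : (10:Int) ^ (pvDigits (t / 10) + 1) = 10 * 10 ^ pvDigits (t / 10) := by ring
    omega
  | case2 t ht =>
    rw [pvDigits]; simp only [if_neg ht]
    omega

theorem pvDigits_le (t : Int) (h : 0 < t) : 10 ^ (pvDigits t - 1) ≤ t := by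
  induction t using pvDigits.induct with
  | case1 t ht ih =>
    rw [pvDigits]; simp only [ht, if_pos, Nat.add_sub_cancel]
    by_cases h10 : 0 < t / 10
    · have h1 : 10 ^ (pvDigits (t / 10) - 1) ≤ t / 10 := ih h10
      have hd : 0 < pvDigits (t / 10) := by rw [pvDigits]; simp [h10]
      have h2 : (10:Int) ^ pvDigits (t / 10) = 10 * 10 ^ (pvDigits (t / 10) - 1) := by
        conv_lhs => rw [show pvDigits (t / 10) = (pvDigits (t / 10) - 1) + 1 by omega]
        ring
      omega
    · have : pvDigits (t / 10) = 0 := by rw [pvDigits]; simp [h10]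
      rw [this]; omega
  | case2 t ht => omega

-- 0 < n / 10^k  ↔  10^k ≤ n   (positive divisor)
theorem pvPosDiv_iff (n : Int) (k : Nat) : 0 < n / (10:Int) ^ k ↔ (10:Int) ^ k ≤ n := by
  have hp : (0:Int) < 10 ^ k := by positivity
  constructor
  · intro h
    have := (Int.le_ediv_iff_mul_le hp).mp (by omega : (1:Int) ≤ n / 10 ^ k)
    omega
  · intro h
    have := (Int.le_ediv_iff_mul_le hp).mpr (by omega : (1:Int) * 10 ^ k ≤ n)
    omega

-- positivity of n / 10^k is downward closed in k
theorem pvPosDiv_mono (n : Int) {a b : Nat} (hab : a ≤ b) (h : 0 < n / (10:Int) ^ b) :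
    0 < n / (10:Int) ^ a := by
  rw [pvPosDiv_iff] at h ⊢
  calc (10:Int) ^ a ≤ 10 ^ b := pow_le_pow_right₀ (by norm_num) hab
    _ ≤ n := h

-- the digit-peeling identities: suffix and quotient step from level j to level j+1
theorem pvSuffixStep (n : Int) (j : Nat) :
    n % (10:Int) ^ j + (n / (10:Int) ^ j) % 10 * (10:Int) ^ j = n % (10:Int) ^ (j + 1) := by
  have hp : (0:Int) < 10 ^ j := by positivity
  have e1 : (10:Int) ^ j * (n / 10 ^ j) + n % 10 ^ j = n := Int.ediv_add_emod n _
  have e2 : (10:Int) * (n / 10 ^ j / 10) + (n / 10 ^ j) % 10 = n / 10 ^ j := Int.ediv_add_emod _ 10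
  have hr1 : 0 ≤ n % (10:Int) ^ j := Int.emod_nonneg n (by omega)
  have hr1' : n % (10:Int) ^ j < 10 ^ j := Int.emod_lt_of_pos n hp
  have hr2 : 0 ≤ (n / (10:Int) ^ j) % 10 := Int.emod_nonneg _ (by omega)
  have hr2' : (n / (10:Int) ^ j) % 10 < 10 := Int.emod_lt_of_pos _ (by omega)
  have hs : (10:Int) ^ (j + 1) = 10 ^ j * 10 := by ring
  have key : n = (n % 10 ^ j + (n / 10 ^ j) % 10 * 10 ^ j)
      + (10:Int) ^ (j + 1) * (n / 10 ^ j / 10) := by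
    rw [hs]; nlinarith [e1, e2]
  have hb : n % (10:Int) ^ j + (n / 10 ^ j) % 10 * 10 ^ j < 10 ^ (j + 1) := by
    rw [hs]; nlinarith [hr1', hr2']
  have hb0 : 0 ≤ n % (10:Int) ^ j + (n / 10 ^ j) % 10 * 10 ^ j := by positivity
  calc n % (10:Int) ^ j + (n / 10 ^ j) % 10 * 10 ^ j
      = (n % 10 ^ j + (n / 10 ^ j) % 10 * 10 ^ j) % 10 ^ (j + 1) :=
        (Int.emod_eq_of_lt hb0 hb).symm
    _ = n % (10:Int) ^ (j + 1) := by
        conv_rhs => rw [key]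
        rw [Int.add_mul_emod_self_left]


theorem pvQuotStep (n : Int) (j : Nat) :
    n / (10:Int) ^ j / 10 = n / (10:Int) ^ (j + 1) := by
  rw [Int.ediv_ediv_of_nonneg (by positivity)]
  congr 1

-- A's loop returns true iff every admitted suffix-lookup (exponents 1..c) is true
theorem pvALoop_iff (n : Int) (arr : List Bool) :
    ∀ c : Nat, (pvALoop n arr (c : Int) = true ↔
      ∀ k : Nat, 1 ≤ k → k ≤ c → PySem.List.pyGetD arr (n % (10:Int) ^ k) true = true) := by
  intro c
  induction c with
  | zero =>
    constructor
    · intro _ k hk1 hk2; omega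
    · intro _; rw [pvALoop]; norm_num
  | succ c ih =>
    rw [pvALoop]
    have h1 : ((c + 1 : Nat) : Int) > 0 := by positivity
    have h2 : ((c + 1 : Nat) : Int).toNat = c + 1 := by omega
    have h3 : ((c + 1 : Nat) : Int) - 1 = (c : Int) := by push_cast; ring
    have h4 : PySem.Int.mod n ((10:Int) ^ (c + 1)) = n % (10:Int) ^ (c + 1) :=
      PySem.Int.mod_eq_emod_of_pos (by positivity)
    rw [if_pos h1, h2, h3, h4]
    by_cases hg : PySem.List.pyGetD arr (n % (10:Int) ^ (c + 1)) true = false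
    · rw [if_pos hg]
      constructor
      · intro h; exact absurd h (by simp)
      · intro h
        have := h (c + 1) (by omega) (by omega)
        rw [this] at hg; exact absurd hg (by simp)
    · rw [if_neg hg, ih]
      constructor
      · intro h k hk1 hk2
        by_cases hkc : k ≤ c
        · exact h k hk1 hkc
        · have : k = c + 1 := by omega
          rw [this]; exact Bool.not_eq_false _ |>.mp hg
      · intro h k hk1 hk2; exact h k hk1 (by omega)

-- B's loop, entered at level j, returns true iff every reachable suffix-lookup is true:
-- exponent j+1 is always checked, exponent k > j+1 is checked iff n / 10^(k-1) > 0
theorem pvBLoop_iff (arr : List Bool) (n : Int) :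
    ∀ fuel : Nat, ∀ j : Nat, (n / (10:Int) ^ j).toNat ≤ fuel →
      (pvBLoop arr (n / (10:Int) ^ j) (n % (10:Int) ^ j) ((10:Int) ^ j) = true ↔
        ∀ k : Nat, j + 1 ≤ k → (k = j + 1 ∨ 0 < n / (10:Int) ^ (k - 1)) →
          PySem.List.pyGetD arr (n % (10:Int) ^ k) true = true) := by
  intro fuel
  induction fuel with
  | zero =>
    intro j hfuel
    rw [pvBLoop.eq_def]
    have hmod : PySem.Int.mod (n / (10:Int) ^ j) 10 = (n / (10:Int) ^ j) % 10 :=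
      PySem.Int.mod_eq_emod_of_pos (by norm_num)
    have hdiv : PySem.Int.floordiv (n / (10:Int) ^ j) 10 = n / (10:Int) ^ (j + 1) := by
      rw [PySem.Int.floordiv_eq_ediv_of_pos (by norm_num)]; exact pvQuotStep n j
    simp only [hmod, hdiv, pvSuffixStep n j]
    have hq0 : ¬ (0 < n / (10:Int) ^ j) := by omega
    have hq1 : ¬ (n / (10:Int) ^ (j + 1) > 0) := by
      intro h; exact hq0 (pvPosDiv_mono n (by omega) h)
    rw [dif_neg hq1]
    by_cases hg : PySem.List.pyGetD arr (n % (10:Int) ^ (j + 1)) true = false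
    · rw [if_pos hg]
      constructor
      · intro h; exact absurd h (by simp)
      · intro h
        have := h (j + 1) (by omega) (Or.inl rfl)
        rw [this] at hg; exact absurd hg (by simp)
    · rw [if_neg hg]
      constructor
      · intro _ k hk1 hk2
        rcases hk2 with hk2 | hk2
        · rw [hk2]; exact Bool.not_eq_false _ |>.mp hg
        · exact absurd (pvPosDiv_mono n (by omega : j ≤ k - 1) hk2) hq0
      · intro _; rfl
  | succ fuel ih =>
    intro j hfuel
    rw [pvBLoop.eq_def]
    have hmod : PySem.Int.mod (n / (10:Int) ^ j) 10 = (n / (10:Int) ^ j) % 10 :=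
      PySem.Int.mod_eq_emod_of_pos (by norm_num)
    have hdiv : PySem.Int.floordiv (n / (10:Int) ^ j) 10 = n / (10:Int) ^ (j + 1) := by
      rw [PySem.Int.floordiv_eq_ediv_of_pos (by norm_num)]; exact pvQuotStep n j
    simp only [hmod, hdiv, pvSuffixStep n j]
    by_cases hg : PySem.List.pyGetD arr (n % (10:Int) ^ (j + 1)) true = false
    · rw [if_pos hg]
      constructor
      · intro h; exact absurd h (by simp)
      · intro h
        have := h (j + 1) (by omega) (Or.inl rfl)
        rw [this] at hg; exact absurd hg (by simp)
    · rw [if_neg hg]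
      have hgt : PySem.List.pyGetD arr (n % (10:Int) ^ (j + 1)) true = true :=
        Bool.not_eq_false _ |>.mp hg
      by_cases hq : n / (10:Int) ^ (j + 1) > 0
      · rw [dif_pos hq]
        have hfuel' : (n / (10:Int) ^ (j + 1)).toNat ≤ fuel := by
          have h1 : 0 < n / (10:Int) ^ j := pvPosDiv_mono n (by omega) hq
          have h2 : n / (10:Int) ^ (j + 1) = n / (10:Int) ^ j / 10 := (pvQuotStep n j).symm
          omega
        have hplace : (10:Int) ^ j * 10 = (10:Int) ^ (j + 1) := by ring
        rw [hplace, ih (j + 1) hfuel']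
        constructor
        · intro h k hk1 hk2
          by_cases hkj : k = j + 1
          · rw [hkj]; exact hgt
          · have hk1' : j + 1 + 1 ≤ k := by omega
            have hkpos : 0 < n / (10:Int) ^ (k - 1) := by
              rcases hk2 with hk2 | hk2
              · omega
              · exact hk2
            exact h k hk1' (Or.inr hkpos)
        · intro h k hk1 hk2
          rcases hk2 with hk2 | hk2
          · have : 0 < n / (10:Int) ^ (k - 1) := by
              rw [show k - 1 = j + 1 by omega]; exact hq
            exact h k (by omega) (Or.inr this)
          · exact h k (by omega) (Or.inr hk2)
      · rw [dif_neg hq]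
        constructor
        · intro _ k hk1 hk2
          by_cases hkj : k = j + 1
          · rw [hkj]; exact hgt
          · rcases hk2 with hk2 | hk2
            · exact absurd hk2 hkj
            · exact absurd (pvPosDiv_mono n (by omega : j + 1 ≤ k - 1) hk2) hq
        · intro _; rfl

-- the two ports agree on every input (even where Python A would raise, both ports use the same
-- defaulted lookup, so the agreement is unconditional; Pre_ is about faithfulness to Python A)
theorem pvPorts_agree (n : Int) (arr : List Bool) :
    isLeftSidedPrime n arr = isLeftSidedPrime_alt n arr := by
  have hA0 : isLeftSidedPrime n arr = pvALoop n arr ((pvDigits n + 1 : Nat) : Int) := by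
    unfold isLeftSidedPrime getDigitCount
    rw [pvGdcLoop_eq]
    congr 1; push_cast; ring
  have hB0 : isLeftSidedPrime_alt n arr
      = pvBLoop arr (n / (10:Int) ^ (0:Nat)) (n % (10:Int) ^ (0:Nat)) ((10:Int) ^ (0:Nat)) := by
    unfold isLeftSidedPrime_alt
    norm_num
  rw [hA0, hB0, Bool.eq_iff_iff, pvALoop_iff n arr (pvDigits n + 1),
    pvBLoop_iff arr n (n / (10:Int) ^ (0:Nat)).toNat 0 le_rfl]
  by_cases hn : 0 < n
  · have hd1 : 1 ≤ pvDigits n := by rw [pvDigits]; simp [hn]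
    have hlt : n < 10 ^ pvDigits n := pvDigits_lt n (by omega)
    have hle : (10:Int) ^ (pvDigits n - 1) ≤ n := pvDigits_le n hn
    have hchar : ∀ k : Nat, 1 ≤ k → (0 < n / (10:Int) ^ (k - 1) ↔ k ≤ pvDigits n) := by
      intro k hk
      rw [pvPosDiv_iff]
      constructor
      · intro h
        by_contra hc
        have : (10:Int) ^ pvDigits n ≤ 10 ^ (k - 1) :=
          pow_le_pow_right₀ (by norm_num) (by omega)
        omega
      · intro h
        calc (10:Int) ^ (k - 1) ≤ 10 ^ (pvDigits n - 1) :=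
              pow_le_pow_right₀ (by norm_num) (by omega)
          _ ≤ n := hle
    constructor
    · intro h k hk1 hk2
      rcases hk2 with hk2 | hk2
      · rw [hk2]; exact h 1 (by omega) (by omega)
      · have hkd := (hchar k (by omega)).mp hk2
        exact h k (by omega) (by omega)
    · intro h k hk1 hk2
      by_cases hkd : k ≤ pvDigits n
      · exact h k (by omega) (by by_cases hk1' : k = 1; · exact Or.inl hk1'
                                 · exact Or.inr ((hchar k hk1).mpr hkd))
      · have hkeq : k = pvDigits n + 1 := by omega
        have hmod1 : n % (10:Int) ^ k = n := by
          apply Int.emod_eq_of_lt (by omega)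
          calc n < 10 ^ pvDigits n := hlt
            _ ≤ 10 ^ k := pow_le_pow_right₀ (by norm_num) (by omega)
        have hmod2 : n % (10:Int) ^ pvDigits n = n := Int.emod_eq_of_lt (by omega) hlt
        rw [hmod1, ← hmod2]
        exact h (pvDigits n) (by omega)
          (by by_cases hd1' : pvDigits n = 1; · exact Or.inl hd1'
              · exact Or.inr ((hchar (pvDigits n) hd1).mpr le_rfl))
  · have hd0 : pvDigits n = 0 := by rw [pvDigits]; simp [hn]
    have hnopos : ∀ k : Nat, ¬ 0 < n / (10:Int) ^ k := by
      intro k h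
      rw [pvPosDiv_iff] at h
      have : (0:Int) < 10 ^ k := by positivity
      omega
    rw [hd0]
    constructor
    · intro h k hk1 hk2
      rcases hk2 with hk2 | hk2
      · rw [hk2]; exact h 1 (by omega) (by omega)
      · exact absurd hk2 (hnopos (k - 1))
    · intro h k hk1 hk2
      have : k = 1 := by omega
      rw [this]; exact h 1 (by omega) (Or.inl rfl)

-- ===== VERDICT (by name: the statement is the Claim_ definition above) =====
theorem isLeftSidedPrime_spec : Claim_equal_isLeftSidedPrime := by
  intro n arr _ _
  unfold Spec_isLeftSidedPrime
  exact pvPorts_agree n arr
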